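-- pv_equiv track=rewrite | github.com/mindroom-ai/mindroom | .github/scripts/generate_skill_references.py | _source_fence_openings
-- ===== SOURCE A (Python) =====
-- def _strip_frontmatter(text: str) -> str:
--     if not text.startswith("---\n"):
--         return text
--
--     _, separator, rest = text[4:].partition("\n---\n")
--     return rest if separator else text
--
-- def _source_fence_openings(source_text: str) -> list[str]:
--     openings: list[str] = []
--     in_code = False
--     for line in _strip_frontmatter(source_text).splitlines():
--         stripped = line.strip()
--         if not stripped.startswith("```"):
--             continue
--         if not in_code:
--             openings.append(stripped)
--         in_code = not in_code
--     return openings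
-- ===== SOURCE B (Python) =====
-- def _strip_frontmatter(text: str) -> str:
--     if not text.startswith("---\n"):
--         return text
--
--     _, separator, rest = text[4:].partition("\n---\n")
--     return rest if separator else text
--
--
-- def _every_other(xs):
--     if not xs:
--         return []
--     return [xs[0]] + _every_other(xs[2:])
--
--
-- def _source_fence_openings(source_text: str) -> list[str]:
--     fences = [s for s in (line.strip() for line in _strip_frontmatter(source_text).splitlines())
--               if s.startswith("```")]
--     return _every_other(fences)
-- ===== Notes on version B (the rewrite author's own statement) =====
-- stated objective: simpler
-- what changed: Replaces the stateful in_code boolean toggle loop with a filter-then-select decomposition: collect all stripped lines starting with ``` in one comprehension, then keep every other one (the opening fences).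
import Mathlib
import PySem

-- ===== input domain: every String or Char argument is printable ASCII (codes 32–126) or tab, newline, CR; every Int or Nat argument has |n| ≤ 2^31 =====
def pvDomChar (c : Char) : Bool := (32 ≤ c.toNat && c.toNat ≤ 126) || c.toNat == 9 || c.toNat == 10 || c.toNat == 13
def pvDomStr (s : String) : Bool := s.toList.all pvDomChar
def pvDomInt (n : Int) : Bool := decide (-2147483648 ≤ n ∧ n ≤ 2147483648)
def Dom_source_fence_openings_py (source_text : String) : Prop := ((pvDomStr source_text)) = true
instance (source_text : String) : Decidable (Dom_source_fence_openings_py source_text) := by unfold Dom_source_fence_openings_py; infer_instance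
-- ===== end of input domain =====

-- B replaces A's in_code boolean toggle with filter-then-take-every-other; objective: simpler.

-- ===== PORT A =====
-- shared helper: _strip_frontmatter (identical in Source A and Source B).
-- str.partition(sep) is ported by hand via Str.find (first occurrence) and slicing: exact.
def pvStripFrontmatter (text : String) : String :=
  if ¬ PySem.Str.startswith text "---\n" then text
  else
    let t := PySem.Str.slice text (some 4) none
    let i := PySem.Str.find t "\n---\n"
    if 0 ≤ i then PySem.Str.slice t (some (i + 5)) none else text

-- the loop body (one line of A's for-loop) as a named step function
def pvStep (st : List String × Bool) (line : String) : List String × Bool :=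
  let stripped := PySem.Str.strip line
  if ¬ PySem.Str.startswith stripped "```" then st
  else ((if st.2 = false then st.1 ++ [stripped] else st.1), !st.2)

def source_fence_openings_py (source_text : String) : List String :=
  ((PySem.Str.splitlines (pvStripFrontmatter source_text)).foldl pvStep ([], false)).1

-- ===== PORT B =====
-- _every_other: [xs[0]] + _every_other(xs[2:]); the xs[2:] slice is unrolled into the match.
def pvEveryOther : List String → List String
  | [] => []
  | [x] => [x]
  | x :: _ :: rest => x :: pvEveryOther rest

def source_fence_openings_py_alt (source_text : String) : List String :=
  pvEveryOther
    (((PySem.Str.splitlines (pvStripFrontmatter source_text)).map PySem.Str.strip).filter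
      (fun s => PySem.Str.startswith s "```"))

-- ===== PRECONDITION & SPEC =====
def Spec_source_fence_openings_py (source_text : String) (out : List String) : Prop := out = source_fence_openings_py_alt source_text
instance (source_text : String) (out : List String) : Decidable (Spec_source_fence_openings_py source_text out) := by unfold Spec_source_fence_openings_py; infer_instance

-- ===== CLAIM (what is proved, stated in full; the proofs are below) =====
def Claim_equal_source_fence_openings_py : Prop := ∀ (source_text : String), Dom_source_fence_openings_py source_text → Spec_source_fence_openings_py source_text (source_fence_openings_py source_text)

-- ===== LEMMAS AND PROOFS =====

theorem pvEveryOther_cons (s : String) (fs : List String) :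
    pvEveryOther (s :: fs) = s :: pvEveryOther fs.tail := by
  cases fs <;> simp [pvEveryOther]

-- loop invariant: A's fold over any line list equals acc ++ every-other of the filtered
-- stripped lines, skipping one more when the loop enters in code (c = true).
theorem pv_fold_key (ls : List String) (acc : List String) (c : Bool) :
    (ls.foldl pvStep (acc, c)).1
    = acc ++ pvEveryOther (((ls.map PySem.Str.strip).filter
        (fun s => PySem.Str.startswith s "```")).drop (if c then 1 else 0)) := by
  induction ls generalizing acc c with
  | nil => cases c <;> simp [pvEveryOther]
  | cons l ls ih =>
    rw [List.foldl_cons]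
    by_cases hp : PySem.Chars.startswith (PySem.Chars.strip l.toList) ['`', '`', '`'] = true
    · have hstep : pvStep (acc, c) l
          = ((if c = false then acc ++ [PySem.Str.strip l] else acc), !c) := by
        simp [pvStep, hp]
      rw [hstep]
      cases c with
      | false =>
        rw [if_pos rfl, Bool.not_false, ih]
        simp [hp, pvEveryOther_cons, List.drop_one]
      | true =>
        rw [if_neg (by decide), Bool.not_true, ih]
        simp [hp]
    · have hstep : pvStep (acc, c) l = (acc, c) := by simp [pvStep, hp]
      rw [hstep, ih]
      simp [hp]

-- ===== VERDICT (by name: the statement is the Claim_ definition above) =====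
theorem source_fence_openings_py_spec : Claim_equal_source_fence_openings_py := by
  intro source_text _
  show _ = _
  unfold source_fence_openings_py source_fence_openings_py_alt
  rw [pv_fold_key]
  simp
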